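-- pv_equiv track=rewrite | github.com/mariammaher550/music-generation-using-genetic-algorithm | Genetic Algorithm.py | remove_rep_sus
-- ===== SOURCE A (Python) =====
-- def remove_rep_sus(indv):
--     prev = indv[0]
--     lst = []
--     if 'sus' not in prev:
--         lst.append(prev)
--     for i in range(len(indv) - 1):
--         if indv[i + 1] == prev:
--             continue
--         if 'sus' not in indv[i + 1]:
--             lst.append(indv[i + 1])
--         prev = indv[i + 1]
--     return lst
-- ===== SOURCE B (Python) =====
-- def remove_rep_sus(indv):
--     out = []
--     i = 0
--     n = len(indv)
--     while i < n:
--         x = indv[i]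
--         if 'sus' not in x:
--             out.append(x)
--         while i < n and indv[i] == x:
--             i += 1
--     return out
-- ===== Notes on version B (the rewrite author's own statement) =====
-- stated objective: alternative
-- what changed: Replaced A's per-element loop that carries a prev variable and compares each element to it by a run-skipping two-pointer scan: an outer loop takes the element at the current index and emits it unless it contains 'sus', and an inner loop advances the index past the whole run of equal elements.
import Mathlib
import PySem

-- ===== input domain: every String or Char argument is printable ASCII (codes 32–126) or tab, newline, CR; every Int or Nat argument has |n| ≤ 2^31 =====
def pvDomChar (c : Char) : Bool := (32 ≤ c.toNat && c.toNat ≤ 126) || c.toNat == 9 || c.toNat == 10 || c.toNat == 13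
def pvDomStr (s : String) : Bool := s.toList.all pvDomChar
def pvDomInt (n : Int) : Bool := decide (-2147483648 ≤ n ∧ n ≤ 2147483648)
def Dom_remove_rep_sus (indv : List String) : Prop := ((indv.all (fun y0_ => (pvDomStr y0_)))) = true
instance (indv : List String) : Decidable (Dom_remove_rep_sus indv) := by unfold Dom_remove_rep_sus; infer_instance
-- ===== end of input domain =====

-- B replaces A's per-element prev-tracking loop by a run-skipping two-pointer scan (outer loop emits
-- the run head unless it contains 'sus', inner loop jumps the index past the run); on empty input A
-- raises IndexError (excluded by Pre_).


-- ===== PORT A =====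
def remove_rep_sus (indv : List String) : List String :=
  match PySem.List.pyGet? indv 0 with
  | none => []   -- Python raises IndexError here (indv[0] on []); excluded by Pre_remove_rep_sus
  | some prev0 =>
    let lst : List String := if PySem.Str.isIn "sus" prev0 then [] else [prev0]
    ((PySem.List.pyRange 0 (PySem.List.len indv - 1) 1).foldl
      (fun (s : String × List String) i =>
        if PySem.List.pyGetD indv (i + 1) "" == s.1 then s
        else (PySem.List.pyGetD indv (i + 1) "",
              if PySem.Str.isIn "sus" (PySem.List.pyGetD indv (i + 1) "") then s.2
              else s.2 ++ [PySem.List.pyGetD indv (i + 1) ""]))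
      (prev0, lst)).2

-- ===== PORT B =====
-- inner while loop: advance i past the run of elements equal to x
def pvSkipRun (indv : List String) (x : String) (i : Nat) : Nat :=
  if _h : i < indv.length ∧ indv.getD i "" == x then pvSkipRun indv x (i + 1) else i
termination_by indv.length - i
decreasing_by omega

-- termination fact the outer loop's recursion cites
lemma pvSkipRun_ge (indv : List String) (x : String) :
    ∀ fuel i, indv.length - i ≤ fuel → i ≤ pvSkipRun indv x i := by
  intro fuel
  induction fuel with
  | zero =>
    intro i hf
    rw [pvSkipRun]
    split
    · omega
    · exact le_rfl
  | succ m ih =>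
    intro i hf
    rw [pvSkipRun]
    split
    · next h => exact le_trans (by omega) (ih (i + 1) (by omega))
    · exact le_rfl

-- outer while loop
def pvAltGo (indv : List String) (i : Nat) (out : List String) : List String :=
  if h : i < indv.length then
    let x := indv.getD i ""
    let out' := if PySem.Str.isIn "sus" x then out else out ++ [x]
    pvAltGo indv (pvSkipRun indv x i) out'
  else out
termination_by indv.length - i
decreasing_by
  have h1 : pvSkipRun indv (indv.getD i "") i = pvSkipRun indv (indv.getD i "") (i + 1) := by
    rw [pvSkipRun]; simp [h]
  have h2 := pvSkipRun_ge indv (indv.getD i "") (indv.length - (i + 1)) (i + 1) le_rfl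
  omega

def remove_rep_sus_alt (indv : List String) : List String := pvAltGo indv 0 []

-- ===== PRECONDITION & SPEC =====
-- Pre_ excludes exactly the empty list, on which A raises IndexError (indv[0]).
def Pre_remove_rep_sus (indv : List String) : Prop := indv ≠ []
instance (indv : List String) : Decidable (Pre_remove_rep_sus indv) := by unfold Pre_remove_rep_sus; infer_instance
def pvWitness_remove_rep_sus : List String := (["C4", "C4", "Asus2", "D"])

def Spec_remove_rep_sus (indv : List String) (out : List String) : Prop := out = remove_rep_sus_alt indv
instance (indv : List String) (out : List String) : Decidable (Spec_remove_rep_sus indv out) := by unfold Spec_remove_rep_sus; infer_instance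

-- ===== CLAIM (what is proved, stated in full; the proofs are below) =====
def Claim_equal_remove_rep_sus : Prop := ∀ (indv : List String), Dom_remove_rep_sus indv → Pre_remove_rep_sus indv → Spec_remove_rep_sus indv (remove_rep_sus indv)

-- ===== LEMMAS AND PROOFS =====

-- consecutive-duplicate collapse, parameterised by the raw predecessor (characterises A's loop)
def pvDedup : String → List String → List String
  | _, [] => []
  | p, x :: xs => if x == p then pvDedup p xs else x :: pvDedup x xs

lemma pv_drop_facts {indv : List String} {k : Nat} {p : String} {xs : List String}
    (h : indv.drop k = p :: xs) :
    indv.length = k + 1 + xs.length ∧ indv[k]? = some p ∧ indv.drop (k + 1) = xs := by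
  have hlen : indv.length - k = xs.length + 1 := by
    have := congrArg List.length h; simpa using this
  have hk : k < indv.length := by omega
  refine ⟨by omega, ?_, ?_⟩
  · have : (indv.drop k)[0]? = indv[k]? := by simp
    rw [← this, h]; rfl
  · have : indv.drop (k + 1) = (indv.drop k).drop 1 := by
      rw [List.drop_drop]
    rw [this, h]; rfl

lemma pv_A_loop (indv : List String) (xs : List String) :
    ∀ (k : Nat) (p : String) (acc : List String), indv.drop k = p :: xs →
    ((PySem.List.pyRange (k : Int) (PySem.List.len indv - 1) 1).foldl
      (fun (s : String × List String) i =>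
        if PySem.List.pyGetD indv (i + 1) "" == s.1 then s
        else (PySem.List.pyGetD indv (i + 1) "",
              if PySem.Str.isIn "sus" (PySem.List.pyGetD indv (i + 1) "") then s.2
              else s.2 ++ [PySem.List.pyGetD indv (i + 1) ""]))
      (p, acc)).2 = acc ++ (pvDedup p xs).filter (fun x => !(PySem.Str.isIn "sus" x)) := by
  induction xs with
  | nil =>
    intro k p acc h
    obtain ⟨hlen, -, -⟩ := pv_drop_facts h
    simp only [List.length_nil] at hlen
    rw [PySem.List.pyRange_one_eq_nil (by simp only [PySem.List.len_eq]; omega)]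
    simp [pvDedup]
  | cons x xs ih =>
    intro k p acc h
    obtain ⟨hlen, -, hdrop⟩ := pv_drop_facts h
    simp only [List.length_cons] at hlen
    have hx : indv[k + 1]? = some x := (pv_drop_facts hdrop).2.1
    have hget : PySem.List.pyGetD indv ((k : Int) + 1) "" = x := by
      have : ((k : Int) + 1) = ((k + 1 : Nat) : Int) := by push_cast; ring
      rw [this, PySem.List.pyGetD_natCast]
      simp [List.getD, hx]
    rw [PySem.List.pyRange_one_cons (by simp only [PySem.List.len_eq]; omega)]
    rw [List.foldl_cons]
    simp only [hget]
    by_cases hxp : x = p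
    · subst hxp
      simp only [BEq.rfl, if_true]
      rw [show ((k : Int) + 1) = ((k + 1 : Nat) : Int) by push_cast; ring]
      rw [ih (k + 1) x acc (by rw [hdrop])]
      simp [pvDedup]
    · have hbeq : (x == p) = false := by simp [hxp]
      simp only [hbeq, Bool.false_eq_true, if_false]
      rw [show ((k : Int) + 1) = ((k + 1 : Nat) : Int) by push_cast; ring]
      rw [ih (k + 1) x _ (by rw [hdrop])]
      cases hb : PySem.Chars.isIn ['s', 'u', 's'] x.toList <;>
        simp [pvDedup, hbeq, hb]

-- spec of B's outer loop: one representative per run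
def pvRunCollapse : List String → List String
  | [] => []
  | x :: xs => x :: pvRunCollapse (xs.dropWhile (· == x))
termination_by l => l.length
decreasing_by
  have := List.length_dropWhile_le (· == x) xs
  simp only [List.length_cons]; omega

lemma pv_drop_skip (indv : List String) (x : String) :
    ∀ fuel i, indv.length - i ≤ fuel →
    indv.drop (pvSkipRun indv x i) = (indv.drop i).dropWhile (· == x) := by
  intro fuel
  induction fuel with
  | zero =>
    intro i hf
    rw [pvSkipRun]
    have hge : indv.length ≤ i := by omega
    rw [dif_neg (by omega)]
    rw [List.drop_eq_nil_of_le hge, List.dropWhile_nil]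
  | succ m ih =>
    intro i hf
    rw [pvSkipRun]
    by_cases h : i < indv.length ∧ indv.getD i "" == x
    · rw [dif_pos h]
      obtain ⟨hi, hx⟩ := h
      rw [ih (i + 1) (by omega)]
      rw [List.drop_eq_getElem_cons hi, List.dropWhile_cons]
      have : (indv[i] == x) = true := by
        rwa [List.getD_eq_getElem _ _ hi] at hx
      rw [this]
      simp
    · rw [dif_neg h]
      by_cases hi : i < indv.length
      · have hx : (indv.getD i "" == x) = false := by
          cases hb : indv.getD i "" == x
          · rfl
          · exact absurd ⟨hi, hb⟩ h
        rw [List.drop_eq_getElem_cons hi, List.dropWhile_cons]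
        have : (indv[i] == x) = false := by
          rwa [List.getD_eq_getElem _ _ hi] at hx
        rw [this]
        simp [← List.drop_eq_getElem_cons hi]
      · rw [List.drop_eq_nil_of_le (by omega), List.dropWhile_nil]

lemma pv_altGo (indv : List String) :
    ∀ fuel i out, indv.length - i ≤ fuel →
    pvAltGo indv i out
      = out ++ (pvRunCollapse (indv.drop i)).filter (fun s => !(PySem.Str.isIn "sus" s)) := by
  intro fuel
  induction fuel with
  | zero =>
    intro i out hf
    rw [pvAltGo, dif_neg (by omega)]
    rw [List.drop_eq_nil_of_le (by omega)]
    simp [pvRunCollapse]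
  | succ m ih =>
    intro i out hf
    rw [pvAltGo]
    by_cases hi : i < indv.length
    · rw [dif_pos hi]
      have hx : indv.getD i "" = indv[i] := List.getD_eq_getElem _ _ hi
      have hskip1 : pvSkipRun indv (indv.getD i "") i = pvSkipRun indv (indv.getD i "") (i + 1) := by
        rw [pvSkipRun]; simp [hi]
      have hge := pvSkipRun_ge indv (indv.getD i "") (indv.length - (i + 1)) (i + 1) le_rfl
      rw [ih (pvSkipRun indv (indv.getD i "") i) _ (by omega)]
      rw [pv_drop_skip indv (indv.getD i "") (indv.length - i) i le_rfl]
      rw [List.drop_eq_getElem_cons hi, List.dropWhile_cons]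
      have hself : (indv[i] == indv[i]) = true := by simp
      rw [hx, hself]
      simp only [if_true]
      rw [pvRunCollapse]
      rw [List.filter_cons]
      cases hb : PySem.Str.isIn "sus" indv[i]
      · simp [hb]
      · simp [hb]
    · rw [dif_neg hi]
      rw [List.drop_eq_nil_of_le (by omega)]
      simp [pvRunCollapse]

lemma pv_collapse_dedup :
    ∀ (l : List String) (p : String), pvRunCollapse (l.dropWhile (· == p)) = pvDedup p l := by
  intro l
  induction l with
  | nil => intro p; simp [pvRunCollapse, pvDedup]
  | cons x xs ih =>
    intro p
    rw [List.dropWhile_cons]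
    by_cases hxp : x = p
    · subst hxp
      simp only [BEq.rfl, if_true]
      rw [ih x]
      simp [pvDedup]
    · have hbeq : (x == p) = false := by simp [hxp]
      rw [hbeq]
      simp only [Bool.false_eq_true, if_false]
      rw [pvRunCollapse, ih x]
      simp [pvDedup, hbeq]

-- ===== VERDICT (by name: the statement is the Claim_ definition above) =====
theorem remove_rep_sus_spec : Claim_equal_remove_rep_sus := by
  intro indv _ hpre
  obtain ⟨p0, rest, rfl⟩ : ∃ p0 rest, indv = p0 :: rest := by
    cases indv with
    | nil => exact absurd rfl hpre
    | cons a l => exact ⟨a, l, rfl⟩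
  unfold Spec_remove_rep_sus remove_rep_sus remove_rep_sus_alt
  rw [PySem.List.pyGet?_zero_cons]
  dsimp only []
  have hA := pv_A_loop (p0 :: rest) rest 0 p0
    (if PySem.Str.isIn "sus" p0 then [] else [p0]) (by simp)
  simp only [Nat.cast_zero] at hA
  rw [hA]
  rw [pv_altGo (p0 :: rest) (p0 :: rest).length 0 [] (by omega)]
  rw [List.drop_zero, pvRunCollapse, ← pv_collapse_dedup rest p0, pv_collapse_dedup rest p0]
  rw [List.filter_cons]
  cases hb : PySem.Str.isIn "sus" p0 <;> simp [hb]
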